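-- pv_equiv track=rewrite | github.com/LotemKahana/nmap-OS-Fingerprinting-in-Python | test.py | perform_id_sequence_test
-- ===== SOURCE A (Python) =====
-- def perform_id_sequence_test(test_type, id_list):
--
--     # Filter out None values from the list
--     id_list = [id_num for id_num in id_list if id_num is not None]
--
--     if len(id_list) < 2:
--         return None  # Not enough responses to perform the test
--
--     # Check if all ID numbers are zero
--     if all(id_num == 0 for id_num in id_list):
--         return 'Z'
--
--     # Check if the IP ID sequence ever increases by at least 20,000
--     if test_type == 'CI':
--         max_diff = max(id_list) - min(id_list)
--         if max_diff >= 20000: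
--             return 'RD'
--
--     # Check if all IP IDs are identical
--     if len(set(id_list)) == 1:
--         return hex(id_list[0])
--
--     # Check if any difference between two consecutive IDs exceeds 1,000 and is not evenly divisible by 256
--     if any(abs(id_list[i] - id_list[i + 1]) > 1000 and (id_list[i] - id_list[i + 1]) % 256 != 0 for i in range(len(id_list) - 1)):
--         return 'RI'
--
--     # Check if all differences are divisible by 256 and no greater than 5,120
--     if all(diff % 256 == 0 and diff <= 5120 for diff in (id_list[i] - id_list[i + 1] for i in range(len(id_list) - 1))):
--         return 'BI'
--
--     # Check if all differences are less than ten
--     if all(abs(id_list[i] - id_list[i + 1]) < 10 for i in range(len(id_list) - 1)):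
--         return 'I'
--
--     # If none of the previous steps identify the generation algorithm, the test is omitted from the fingerprint
--     return None
-- ===== SOURCE B (Python) =====
-- def perform_id_sequence_test(test_type, id_list):
--     xs = [x for x in id_list if x is not None]
--     if len(xs) < 2:
--         return None
--     first = xs[0]
--     mx = mn = prev = first
--     all_zero = first == 0
--     all_eq = True
--     any_ri = False
--     all_bi = True
--     all_i = True
--     for x in xs[1:]:
--         if x > mx:
--             mx = x
--         if x < mn:
--             mn = x
--         if x != 0:
--             all_zero = False
--         if x != first:
--             all_eq = False
--         d = prev - x
--         if abs(d) > 1000 and d % 256 != 0: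
--             any_ri = True
--         if not (d % 256 == 0 and d <= 5120):
--             all_bi = False
--         if not (abs(d) < 10):
--             all_i = False
--         prev = x
--     if all_zero:
--         return 'Z'
--     if test_type == 'CI' and mx - mn >= 20000:
--         return 'RD'
--     if all_eq:
--         return hex(first)
--     if any_ri:
--         return 'RI'
--     if all_bi:
--         return 'BI'
--     if all_i:
--         return 'I'
--     return None
-- ===== Notes on version B (the rewrite author's own statement) =====
-- stated objective: alternative
-- what changed: Replaces A's six separate scans (all-zero all(), max()+min(), set() construction, and three index-ranged generator passes over consecutive differences) by a single left-to-right pass that accumulates running max/min, an all-zero flag, an all-equal-to-first flag and the three pairwise-difference flags, then applies the same ordered decision cascade.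
import Mathlib
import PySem

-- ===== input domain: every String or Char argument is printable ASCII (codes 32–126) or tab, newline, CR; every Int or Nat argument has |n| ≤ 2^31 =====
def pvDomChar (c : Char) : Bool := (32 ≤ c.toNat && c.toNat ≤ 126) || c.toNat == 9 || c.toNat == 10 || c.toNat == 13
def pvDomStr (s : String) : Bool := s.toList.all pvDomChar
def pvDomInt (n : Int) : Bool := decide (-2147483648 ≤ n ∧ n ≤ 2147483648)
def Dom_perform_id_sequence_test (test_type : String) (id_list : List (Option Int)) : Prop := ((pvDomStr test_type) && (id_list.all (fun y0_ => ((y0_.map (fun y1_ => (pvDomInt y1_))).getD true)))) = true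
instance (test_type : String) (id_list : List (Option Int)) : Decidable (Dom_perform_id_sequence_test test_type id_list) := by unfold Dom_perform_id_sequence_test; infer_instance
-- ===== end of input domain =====

-- B replaces A's six independent scans (all-zero, max/min, set build, and three
-- index-ranged consecutive-difference comprehensions) by ONE left-to-right pass that
-- accumulates running max/min, all-zero, all-equal-to-first and the three pairwise
-- flags, then applies the same ordered decision cascade (objective: alternative).

-- ===== PORT A =====
-- hex(n): Python's hex builtin — '0x' + lowercase hex digits of |n|, '-' prefix for n < 0.
def pyHex (n : Int) : String :=
  (if n < 0 then "-0x" else "0x") ++ String.ofList (Nat.toDigits 16 n.natAbs)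

def perform_id_sequence_test (test_type : String) (id_list : List (Option Int)) : Option String :=
  -- [id_num for id_num in id_list if id_num is not None]
  let xs := id_list.filterMap (fun x => x)
  if xs.length < 2 then none
  else if xs.all (fun n => n == 0) then some "Z"
  -- test_type == 'CI' gate and max(..)-min(..) (list nonempty here, so .getD 0 is never taken)
  else if test_type == "CI" &&
      ((PySem.List.max? xs (fun y => y)).getD 0 - (PySem.List.min? xs (fun y => y)).getD 0 ≥ 20000) then some "RD"
  else if (PySem.Set.ofList xs).length == 1 then some (pyHex (PySem.List.pyGetD xs 0 0))
  -- the three range(len-1) comprehensions; indices are always in range, pyGetD's default is never taken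
  else if (PySem.List.pyRange 0 ((xs.length : Int) - 1) 1).any (fun i =>
      |PySem.List.pyGetD xs i 0 - PySem.List.pyGetD xs (i + 1) 0| > 1000 &&
      PySem.Int.mod (PySem.List.pyGetD xs i 0 - PySem.List.pyGetD xs (i + 1) 0) 256 ≠ 0) then some "RI"
  else if (PySem.List.pyRange 0 ((xs.length : Int) - 1) 1).all (fun i =>
      PySem.Int.mod (PySem.List.pyGetD xs i 0 - PySem.List.pyGetD xs (i + 1) 0) 256 = 0 &&
      PySem.List.pyGetD xs i 0 - PySem.List.pyGetD xs (i + 1) 0 ≤ 5120) then some "BI"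
  else if (PySem.List.pyRange 0 ((xs.length : Int) - 1) 1).all (fun i =>
      |PySem.List.pyGetD xs i 0 - PySem.List.pyGetD xs (i + 1) 0| < 10) then some "I"
  else none

-- ===== PORT B =====
-- the single-pass accumulator of Source B's loop
structure PvSt where
  mx : Int
  mn : Int
  allZero : Bool
  allEq : Bool
  anyRI : Bool
  allBI : Bool
  allI : Bool
  prev : Int
deriving Repr, DecidableEq

def pvStep (first : Int) (s : PvSt) (x : Int) : PvSt :=
  let mx := if x > s.mx then x else s.mx
  let mn := if x < s.mn then x else s.mn
  let allZero := if x ≠ 0 then false else s.allZero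
  let allEq := if x ≠ first then false else s.allEq
  let d := s.prev - x
  let anyRI := if |d| > 1000 ∧ PySem.Int.mod d 256 ≠ 0 then true else s.anyRI
  let allBI := if ¬(PySem.Int.mod d 256 = 0 ∧ d ≤ 5120) then false else s.allBI
  let allI := if ¬(|d| < 10) then false else s.allI
  ⟨mx, mn, allZero, allEq, anyRI, allBI, allI, x⟩

def perform_id_sequence_test_alt (test_type : String) (id_list : List (Option Int)) : Option String :=
  let xs := id_list.filterMap (fun x => x)
  match xs with
  | [] => none
  | [_] => none
  | first :: rest =>
    let s := rest.foldl (pvStep first) ⟨first, first, first == 0, true, false, true, true, first⟩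
    if s.allZero then some "Z"
    else if test_type == "CI" && s.mx - s.mn ≥ 20000 then some "RD"
    else if s.allEq then some (pyHex first)
    else if s.anyRI then some "RI"
    else if s.allBI then some "BI"
    else if s.allI then some "I"
    else none

-- ===== PRECONDITION & SPEC =====
def Spec_perform_id_sequence_test (test_type : String) (id_list : List (Option Int)) (out : Option String) : Prop := out = perform_id_sequence_test_alt test_type id_list
instance (test_type : String) (id_list : List (Option Int)) (out : Option String) : Decidable (Spec_perform_id_sequence_test test_type id_list out) := by unfold Spec_perform_id_sequence_test; infer_instance

-- ===== CLAIM (what is proved, stated in full; the proofs are below) =====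
def Claim_equal_perform_id_sequence_test : Prop := ∀ (test_type : String) (id_list : List (Option Int)), Dom_perform_id_sequence_test test_type id_list → Spec_perform_id_sequence_test test_type id_list (perform_id_sequence_test test_type id_list)

-- ===== LEMMAS AND PROOFS =====

-- the single fold of B computes each aggregate independently
theorem pvFold_spec (first : Int) : ∀ (l : List Int) (st : PvSt),
    l.foldl (pvStep first) st =
      ⟨l.foldl max st.mx, l.foldl min st.mn,
       st.allZero && l.all (fun x => x == 0),
       st.allEq && l.all (fun x => x == first),
       st.anyRI || ((st.prev :: l).zip l).any (fun p =>
         |p.1 - p.2| > 1000 && PySem.Int.mod (p.1 - p.2) 256 ≠ 0),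
       st.allBI && ((st.prev :: l).zip l).all (fun p =>
         PySem.Int.mod (p.1 - p.2) 256 = 0 && p.1 - p.2 ≤ 5120),
       st.allI && ((st.prev :: l).zip l).all (fun p => |p.1 - p.2| < 10),
       l.getLastD st.prev⟩ := by
  intro l
  induction l with
  | nil => intro st; simp
  | cons x l ih =>
    intro st
    rw [List.foldl_cons, ih]
    simp only [pvStep, List.zip_cons_cons, List.any_cons, List.all_cons, List.getLastD_cons]
    have hmx : (if x > st.mx then x else st.mx) = max st.mx x := by split <;> omega
    have hmn : (if x < st.mn then x else st.mn) = min st.mn x := by split <;> omega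
    rw [hmx, hmn]
    congr 1
    · by_cases h : x = 0 <;> simp [h]
    · by_cases h : x = first <;> simp [h]
    · by_cases h1 : (1000:Int) < |st.prev - x| <;>
        by_cases h2 : PySem.Int.mod (st.prev - x) 256 = 0 <;>
          simp [h1, h2] <;> try ac_rfl
    · by_cases h1 : PySem.Int.mod (st.prev - x) 256 = 0 <;>
        by_cases h2 : st.prev - x ≤ 5120 <;>
          simp [h1, h2] <;> try ac_rfl
    · by_cases h : |st.prev - x| < 10 <;> simp [h]

theorem pvAllCongr {α : Type} {l : List α} {f g : α → Bool} (h : ∀ x ∈ l, f x = g x) :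
    l.all f = l.all g := by
  induction l with
  | nil => rfl
  | cons x t ih => simp only [List.all_cons, h x (by simp), ih (fun y hy => h y (by simp [hy]))]

-- A's index-ranged any/all over consecutive pairs, through Nat indices ...
theorem pvRangeAny (q : Int → Int → Bool) : ∀ (xs : List Int),
    (List.range (xs.length - 1)).any (fun i => q (xs.getD i 0) (xs.getD (i + 1) 0)) =
      (xs.zip xs.tail).any (fun p => q p.1 p.2) := by
  intro xs
  induction xs with
  | nil => simp
  | cons a t ih =>
    cases t with
    | nil => simp
    | cons b t' =>
      simp only [List.length_cons, Nat.add_sub_cancel, List.range_succ_eq_map,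
        List.any_cons, List.any_map, List.tail_cons, List.zip_cons_cons]
      congr 1

theorem pvRangeAll (q : Int → Int → Bool) : ∀ (xs : List Int),
    (List.range (xs.length - 1)).all (fun i => q (xs.getD i 0) (xs.getD (i + 1) 0)) =
      (xs.zip xs.tail).all (fun p => q p.1 p.2) := by
  intro xs
  induction xs with
  | nil => simp
  | cons a t ih =>
    cases t with
    | nil => simp
    | cons b t' =>
      simp only [List.length_cons, Nat.add_sub_cancel, List.range_succ_eq_map,
        List.all_cons, List.all_map, List.tail_cons, List.zip_cons_cons]
      congr 1

-- ... and the pyRange/pyGetD form reduces to the Nat-index form (list nonempty)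
theorem pvPyAny (q : Int → Int → Bool) (xs : List Int) (h : xs ≠ []) :
    (PySem.List.pyRange 0 ((xs.length : Int) - 1) 1).any (fun i =>
        q (PySem.List.pyGetD xs i 0) (PySem.List.pyGetD xs (i + 1) 0)) =
      (xs.zip xs.tail).any (fun p => q p.1 p.2) := by
  have hl : ((xs.length : Int) - 1) = ((xs.length - 1 : Nat) : Int) := by
    have : 1 ≤ xs.length := List.length_pos_iff.mpr h
    omega
  rw [hl, PySem.List.pyRange_zero_natCast, List.any_map, ← pvRangeAny q xs]
  apply PySem.List.any_congr_mem
  intro i _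
  have h1 : ((i : Int) + 1) = ((i + 1 : Nat) : Int) := by push_cast; ring
  simp only [Function.comp_apply, h1, PySem.List.pyGetD_natCast]

theorem pvPyAll (q : Int → Int → Bool) (xs : List Int) (h : xs ≠ []) :
    (PySem.List.pyRange 0 ((xs.length : Int) - 1) 1).all (fun i =>
        q (PySem.List.pyGetD xs i 0) (PySem.List.pyGetD xs (i + 1) 0)) =
      (xs.zip xs.tail).all (fun p => q p.1 p.2) := by
  have hl : ((xs.length : Int) - 1) = ((xs.length - 1 : Nat) : Int) := by
    have : 1 ≤ xs.length := List.length_pos_iff.mpr h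
    omega
  rw [hl, PySem.List.pyRange_zero_natCast, List.all_map, ← pvRangeAll q xs]
  apply pvAllCongr
  intro i _
  have h1 : ((i : Int) + 1) = ((i + 1 : Nat) : Int) := by push_cast; ring
  simp only [Function.comp_apply, h1, PySem.List.pyGetD_natCast]

-- len(set(xs)) == 1 means: every element equals the first
theorem pvSetAdd_mono (x : Int) (s : PySem.Set Int) : s.length ≤ (PySem.Set.add s x).length := by
  simp only [PySem.Set.add]; split <;> simp
theorem pvSetFold_mono : ∀ (t : List Int) (s : PySem.Set Int),
    s.length ≤ (t.foldl PySem.Set.add s).length := by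
  intro t
  induction t with
  | nil => simp
  | cons x t ih => intro s; exact le_trans (pvSetAdd_mono x s) (ih _)
theorem pvSetLen1 : ∀ (t : List Int) (a : Int),
    ((PySem.Set.ofList (a :: t)).length == 1) = t.all (fun x => x == a) := by
  have key : ∀ (t : List Int) (a : Int),
      ((t.foldl PySem.Set.add [a]).length == 1) = t.all (fun x => x == a) := by
    intro t
    induction t with
    | nil => simp
    | cons x t ih =>
      intro a
      rw [List.foldl_cons]
      by_cases h : x = a
      · subst h
        have hadd : PySem.Set.add [x] x = [x] := by simp [PySem.Set.add, PySem.Set.contains]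
        rw [hadd, ih]
        simp
      · have hadd : PySem.Set.add [a] x = [a, x] := by simp [PySem.Set.add, PySem.Set.contains, h]
        have h2 := pvSetFold_mono t [a, x]
        simp only [List.length_cons] at h2
        have hne : (t.foldl PySem.Set.add [a, x]).length ≠ 1 := by omega
        rw [hadd]
        rw [List.all_cons, show (x == a) = false by simp [h], Bool.false_and,
          show (List.length (List.foldl PySem.Set.add [a, x] t) == 1) = false by simp [hne]]
  intro t a
  rw [PySem.Set.ofList_eq_foldl]
  simpa using key t a

-- running max/min of B are A's max()/min()
theorem pvFoldlMaxMin (rest : List Int) (a : Int) :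
    (PySem.List.max? (a :: rest) (fun y => y)).getD 0 = rest.foldl max a ∧
    (PySem.List.min? (a :: rest) (fun y => y)).getD 0 = rest.foldl min a := by
  rw [PySem.List.max?_id_cons, PySem.List.min?_id_cons]; simp

-- ===== VERDICT (by name: the statement is the Claim_ definition above) =====
theorem perform_id_sequence_test_spec : Claim_equal_perform_id_sequence_test := by
  intro test_type id_list _
  unfold Spec_perform_id_sequence_test perform_id_sequence_test perform_id_sequence_test_alt
  cases hxs : id_list.filterMap (fun x => x) with
  | nil => simp
  | cons a rest =>
    cases rest with
    | nil => simp
    | cons b t =>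
      have hne : (a :: b :: t : List Int) ≠ [] := by simp
      simp only []
      rw [pvFold_spec,
        pvPyAny (fun u v => |u - v| > 1000 && PySem.Int.mod (u - v) 256 ≠ 0) _ hne,
        pvPyAll (fun u v => PySem.Int.mod (u - v) 256 = 0 && u - v ≤ 5120) _ hne,
        pvPyAll (fun u v => |u - v| < 10) _ hne]
      obtain ⟨hmx, hmn⟩ := pvFoldlMaxMin (b :: t) a
      rw [hmx, hmn, pvSetLen1]
      simp [PySem.List.pyGetD_ofNat', Bool.and_assoc]
      rfl
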